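-- pv_equiv track=rewrite | github.com/Qazzquimby/prototypical-tactics-game | sheetParser/complexTypeParser.py | reduce_char
-- ===== SOURCE A (Python) =====
-- def reduce_char(chars):
--     value = 0
--     is_header = False
--     for char in chars:
--         if char == "\\":
--             is_header = True
--             continue
--         value *= 26
--         value += ord(char.lower()) - 96
--
--     if is_header:
--         value = value + 1000
--     # because 'c' is 0, a and b are reserved, and areas start from 0, but a=1
--     return value - 1
-- ===== SOURCE B (Python) =====
-- def reduce_char(chars):
--     is_header = "\\" in chars
--     letters = [c for c in chars if c != "\\"]
--     value = 0
--     power = 1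
--     for c in reversed(letters):
--         value += (ord(c.lower()) - 96) * power
--         power *= 26
--     if is_header:
--         value += 1000
--     return value - 1
-- ===== Notes on version B (the rewrite author's own statement) =====
-- stated objective: alternative
-- what changed: Replaces the single interleaved Horner accumulation with a sticky flag inside the loop by a partition (header flag via substring test, letters via filter) followed by a positional-weight sum over the reversed letters with a running power of 26.
import Mathlib
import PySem

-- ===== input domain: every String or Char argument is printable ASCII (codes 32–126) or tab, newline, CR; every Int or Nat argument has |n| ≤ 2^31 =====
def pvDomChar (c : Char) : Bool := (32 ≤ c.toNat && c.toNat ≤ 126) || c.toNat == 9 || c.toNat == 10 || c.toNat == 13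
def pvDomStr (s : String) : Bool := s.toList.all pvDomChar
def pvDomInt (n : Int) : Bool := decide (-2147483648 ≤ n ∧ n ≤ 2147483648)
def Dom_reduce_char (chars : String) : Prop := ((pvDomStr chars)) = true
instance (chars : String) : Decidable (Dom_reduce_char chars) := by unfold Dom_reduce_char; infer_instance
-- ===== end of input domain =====

-- B replaces A's interleaved Horner fold (with sticky header flag) by a partition
-- (flag via containment, letters via filter) plus a positional-power sum over the
-- reversed letters: an alternative decomposition, same cost.


-- ===== PORT A =====
-- fold state: (value, is_header), exactly A's loop
def reduce_char (chars : String) : Int :=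
  let st := chars.toList.foldl
    (fun (s : Int × Bool) c =>
      if c = '\\' then (s.1, true)
      else (s.1 * 26 + (((PySem.Chars.lowerChar c).toNat : Int) - 96), s.2))
    (0, false)
  (if st.2 then st.1 + 1000 else st.1) - 1

-- ===== PORT B =====
def reduce_char_alt (chars : String) : Int :=
  let isHeader := chars.toList.contains '\\'
  let letters := chars.toList.filter (fun c => c ≠ '\\')
  let vp := letters.reverse.foldl
    (fun (s : Int × Int) c =>
      (s.1 + (((PySem.Chars.lowerChar c).toNat : Int) - 96) * s.2, s.2 * 26))
    (0, 1)
  (if isHeader then vp.1 + 1000 else vp.1) - 1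

-- ===== PRECONDITION & SPEC =====
def Spec_reduce_char (chars : String) (out : Int) : Prop := out = reduce_char_alt chars
instance (chars : String) (out : Int) : Decidable (Spec_reduce_char chars out) := by unfold Spec_reduce_char; infer_instance

-- ===== CLAIM (what is proved, stated in full; the proofs are below) =====
def Claim_equal_reduce_char : Prop := ∀ (chars : String), Dom_reduce_char chars → Spec_reduce_char chars (reduce_char chars)

-- ===== LEMMAS AND PROOFS =====

def pvDigit (c : Char) : Int := ((PySem.Chars.lowerChar c).toNat : Int) - 96

def pvHorner (l : List Char) (v : Int) : Int :=
  l.foldl (fun a c => a * 26 + pvDigit c) v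

theorem pvHorner_shift (l : List Char) (v : Int) :
    pvHorner l v = v * 26 ^ l.length + pvHorner l 0 := by
  induction l generalizing v with
  | nil => simp [pvHorner]
  | cons c cs ih =>
      simp only [pvHorner, List.foldl_cons, List.length_cons]
      rw [show cs.foldl (fun a c => a * 26 + pvDigit c) (v * 26 + pvDigit c) =
            pvHorner cs (v * 26 + pvDigit c) from rfl,
          show cs.foldl (fun a c => a * 26 + pvDigit c) (0 * 26 + pvDigit c) =
            pvHorner cs (0 * 26 + pvDigit c) from rfl,
          ih (v * 26 + pvDigit c), ih (0 * 26 + pvDigit c)]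
      ring

theorem pvFoldA (l : List Char) (v : Int) (b : Bool) :
    l.foldl (fun (s : Int × Bool) c =>
      if c = '\\' then (s.1, true)
      else (s.1 * 26 + pvDigit c, s.2)) (v, b)
    = (pvHorner (l.filter (fun c => c ≠ '\\')) v, b || l.contains '\\') := by
  induction l generalizing v b with
  | nil => simp [pvHorner]
  | cons c cs ih =>
      by_cases h : c = '\\' <;>
        cases b <;> simp [h, ih, pvHorner, eq_comm]

theorem pvFoldB (l : List Char) :
    l.reverse.foldl
      (fun (s : Int × Int) c => (s.1 + pvDigit c * s.2, s.2 * 26)) (0, 1)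
    = (pvHorner l 0, (26 : Int) ^ l.length) := by
  induction l with
  | nil => simp [pvHorner]
  | cons c cs ih =>
      have harr : (c :: cs).reverse = cs.reverse ++ [c] := by simp
      rw [harr, List.foldl_append, ih]
      have h1 : pvHorner (c :: cs) 0 = pvHorner cs (0 * 26 + pvDigit c) := rfl
      have h2 := pvHorner_shift cs (0 * 26 + pvDigit c)
      simp only [List.foldl_cons, List.foldl_nil, List.length_cons, h1, h2]
      refine Prod.ext ?_ ?_ <;> simp <;> ring

-- ===== VERDICT (by name: the statement is the Claim_ definition above) =====
theorem reduce_char_spec : Claim_equal_reduce_char := by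
  intro chars _
  show reduce_char chars = reduce_char_alt chars
  unfold reduce_char reduce_char_alt
  rw [show (fun (s : Int × Bool) c =>
      if c = '\\' then (s.1, true)
      else (s.1 * 26 + (((PySem.Chars.lowerChar c).toNat : Int) - 96), s.2)) =
      (fun (s : Int × Bool) c =>
      if c = '\\' then (s.1, true)
      else (s.1 * 26 + pvDigit c, s.2)) from rfl]
  rw [show (fun (s : Int × Int) c =>
      (s.1 + (((PySem.Chars.lowerChar c).toNat : Int) - 96) * s.2, s.2 * 26)) =
      (fun (s : Int × Int) c => (s.1 + pvDigit c * s.2, s.2 * 26)) from rfl]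
  simp only []
  rw [pvFoldA, pvFoldB]
  simp
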